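-- pv_equiv track=rewrite | github.com/Galdaer/portfolio | services/user/medical-mirrors/src/enhanced_drug_sources/rxclass_parser.py | extract_primary_therapeutic_class
-- ===== SOURCE A (Python) =====
-- def extract_primary_therapeutic_class(classes_text: str) -> str:
--     """Extract the primary therapeutic class from combined classes text"""
--     if not classes_text:
--         return ""
--
--     classes = classes_text.split("; ")
--
--     # Prioritize certain class types
--     priority_types = [
--         "Chemical/Ingredient",
--         "Mechanism of Action",
--         "Physiologic Effect",
--         "Therapeutic Category",
--     ]
--
--     for priority_type in priority_types:
--         for class_info in classes:
--             if f"({priority_type})" in class_info: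
--                 # Extract just the class name without type
--                 return class_info.replace(f" ({priority_type})", "")
--
--     # If no priority type found, return the first class
--     if classes:
--         # Remove type info from first class
--         first_class = classes[0]
--         return first_class.split(" (")[0] if " (" in first_class else first_class
--
--     return ""
-- ===== SOURCE B (Python) =====
-- def extract_primary_therapeutic_class(classes_text: str) -> str:
--     """Extract the primary therapeutic class from combined classes text"""
--     if not classes_text:
--         return ""
--
--     classes = classes_text.split("; ")
--
--     priority_types = [
--         "Chemical/Ingredient",
--         "Mechanism of Action",
--         "Physiologic Effect",
--         "Therapeutic Category",
--     ]
--
--     # Single pass over the classes: each class gets the rank of the first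
--     # priority type annotated in it; keep the earliest class with the
--     # globally lowest rank.
--     best = None  # (rank, class, matched type)
--     for class_info in classes:
--         found = next(
--             ((i, t) for i, t in enumerate(priority_types) if f"({t})" in class_info),
--             None,
--         )
--         if found is not None and (best is None or found[0] < best[0]):
--             best = (found[0], class_info, found[1])
--
--     if best is not None:
--         return best[1].replace(f" ({best[2]})", "")
--
--     first_class = classes[0]
--     return first_class.split(" (")[0] if " (" in first_class else first_class
-- ===== Notes on version B (the rewrite author's own statement) =====
-- stated objective: alternative
-- what changed: Replaced the priority-type-outer nested scan (restarting over all classes for each type) by a single pass over the classes that computes each class's first-matching priority rank and keeps the earliest class with the globally lowest rank.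
import Mathlib
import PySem

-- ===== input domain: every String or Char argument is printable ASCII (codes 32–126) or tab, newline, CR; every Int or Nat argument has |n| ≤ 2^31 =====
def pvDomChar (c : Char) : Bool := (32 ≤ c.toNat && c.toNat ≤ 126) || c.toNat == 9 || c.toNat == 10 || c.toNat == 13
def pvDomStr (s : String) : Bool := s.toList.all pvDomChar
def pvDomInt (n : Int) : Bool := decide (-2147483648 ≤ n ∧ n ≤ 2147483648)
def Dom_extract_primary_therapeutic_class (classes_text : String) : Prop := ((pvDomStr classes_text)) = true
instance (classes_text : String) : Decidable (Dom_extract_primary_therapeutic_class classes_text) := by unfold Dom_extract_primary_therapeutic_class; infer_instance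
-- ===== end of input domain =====

-- B replaces A's priority-type-outer nested scan by a single pass over the classes
-- tracking the earliest class with the lowest priority rank (objective: alternative).

-- ===== PORT A =====

def pvPriorityTypes : List String :=
  ["Chemical/Ingredient", "Mechanism of Action", "Physiologic Effect", "Therapeutic Category"]

-- A's inner loop: 'for class_info in classes: if f"({t})" in class_info: return …'
def pvInnerA (t : String) : List String → Option String
  | [] => none
  | c :: cs =>
    if PySem.Str.isIn ("(" ++ t ++ ")") c then
      some (PySem.Str.replace c (" (" ++ t ++ ")") "")
    else pvInnerA t cs

-- A's outer loop over the priority types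
def pvOuterA (cs : List String) : List String → Option String
  | [] => none
  | t :: ts =>
    match pvInnerA t cs with
    | some r => some r
    | none => pvOuterA cs ts

def extract_primary_therapeutic_class (classes_text : String) : String :=
  if classes_text = "" then ""
  else
    let classes := (PySem.Str.split? classes_text "; ").getD []
    match pvOuterA classes pvPriorityTypes with
    | some r => r
    | none =>
      match classes with
      | [] => ""
      | first_class :: _ =>
        if PySem.Str.isIn " (" first_class then
          ((PySem.Str.split? first_class " (").getD []).headD first_class
        else first_class

-- ===== PORT B =====

-- first (rank, type) in the priority list annotated in c, scanning with an index
def pvFirstHit (c : String) (i : Nat) : List String → Option (Nat × String)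
  | [] => none
  | t :: ts =>
    if PySem.Str.isIn ("(" ++ t ++ ")") c then some (i, t)
    else pvFirstHit c (i + 1) ts

def pvStepB (best : Option (Nat × String × String)) (c : String) : Option (Nat × String × String) :=
  match pvFirstHit c 0 pvPriorityTypes with
  | none => best
  | some (r, t) =>
    match best with
    | none => some (r, c, t)
    | some (rb, cb, tb) => if r < rb then some (r, c, t) else some (rb, cb, tb)

def extract_primary_therapeutic_class_alt (classes_text : String) : String :=
  if classes_text = "" then ""
  else
    let classes := (PySem.Str.split? classes_text "; ").getD []
    match classes.foldl pvStepB none with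
    | some (_, c, t) => PySem.Str.replace c (" (" ++ t ++ ")") ""
    | none =>
      match classes with
      | [] => ""
      | first_class :: _ =>
        if PySem.Str.isIn " (" first_class then
          ((PySem.Str.split? first_class " (").getD []).headD first_class
        else first_class

-- ===== PRECONDITION & SPEC =====
def Spec_extract_primary_therapeutic_class (classes_text : String) (out : String) : Prop := out = extract_primary_therapeutic_class_alt classes_text
instance (classes_text : String) (out : String) : Decidable (Spec_extract_primary_therapeutic_class classes_text out) := by unfold Spec_extract_primary_therapeutic_class; infer_instance

-- ===== CLAIM (what is proved, stated in full; the proofs are below) =====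
def Claim_equal_extract_primary_therapeutic_class : Prop := ∀ (classes_text : String), Dom_extract_primary_therapeutic_class classes_text → Spec_extract_primary_therapeutic_class classes_text (extract_primary_therapeutic_class classes_text)

-- ===== LEMMAS AND PROOFS =====

-- proof-side: first class in cs containing "(t)" (pvInnerA without the replace)
def pvFindC (t : String) : List String → Option String
  | [] => none
  | c :: cs => if PySem.Str.isIn ("(" ++ t ++ ")") c then some c else pvFindC t cs

-- proof-side: A's chain with an explicit index, keeping (rank, class, type)
def pvChain (cs : List String) (i : Nat) : List String → Option (Nat × String × String)
  | [] => none
  | t :: ts =>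
    match pvFindC t cs with
    | some c => some (i, c, t)
    | none => pvChain cs (i + 1) ts

theorem pvInnerA_eq_findC (t : String) (cs : List String) :
    pvInnerA t cs = (pvFindC t cs).map (fun c => PySem.Str.replace c (" (" ++ t ++ ")") "") := by
  induction cs with
  | nil => rfl
  | cons c cs ih => simp only [pvInnerA, pvFindC]; split <;> simp [ih]

theorem pvOuterA_eq_chain (cs : List String) (ts : List String) (i : Nat) :
    pvOuterA cs ts = (pvChain cs i ts).map (fun p => PySem.Str.replace p.2.1 (" (" ++ p.2.2 ++ ")") "") := by
  induction ts generalizing i with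
  | nil => rfl
  | cons t ts ih =>
    simp only [pvOuterA, pvChain, pvInnerA_eq_findC]
    cases hf : pvFindC t cs with
    | some c => simp
    | none => simpa using ih (i + 1)

theorem pvChain_nil (i : Nat) (ts : List String) : pvChain [] i ts = none := by
  induction ts generalizing i with
  | nil => rfl
  | cons t ts ih => simp [pvChain, pvFindC, ih]

theorem pvChain_rank_ge (cs : List String) (i : Nat) (ts : List String) (r : Nat) (c t : String)
    (h : pvChain cs i ts = some (r, c, t)) : i ≤ r := by
  induction ts generalizing i with
  | nil => simp [pvChain] at h
  | cons t0 ts ih =>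
    simp only [pvChain] at h
    cases hf : pvFindC t0 cs with
    | some c0 => rw [hf] at h; simp at h; omega
    | none => rw [hf] at h; exact le_trans (by omega) (ih (i + 1) h)

theorem pvFirstHit_rank_ge (c : String) (i : Nat) (ts : List String) (r : Nat) (t : String)
    (h : pvFirstHit c i ts = some (r, t)) : i ≤ r := by
  induction ts generalizing i with
  | nil => simp [pvFirstHit] at h
  | cons t0 ts ih =>
    simp only [pvFirstHit] at h
    cases h0 : PySem.Str.isIn ("(" ++ t0 ++ ")") c with
    | true => rw [h0] at h; simp at h; omega
    | false =>
      rw [h0] at h; simp only [Bool.false_eq_true, if_false] at h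
      exact le_trans (by omega) (ih (i + 1) h)

theorem pvFirstHit_none (c : String) (i : Nat) (ts : List String)
    (h : pvFirstHit c i ts = none) : ∀ t ∈ ts, PySem.Str.isIn ("(" ++ t ++ ")") c = false := by
  induction ts generalizing i with
  | nil => simp
  | cons t0 ts ih =>
    simp only [pvFirstHit] at h
    intro t ht
    cases h0 : PySem.Str.isIn ("(" ++ t0 ++ ")") c with
    | true => rw [h0] at h; simp at h
    | false =>
      rw [h0] at h; simp only [Bool.false_eq_true, if_false] at h
      rcases List.mem_cons.1 ht with rfl | ht'
      · exact h0
      · exact ih (i + 1) h t ht'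

theorem pvChain_skip (c : String) (cs : List String) (i : Nat) (ts : List String)
    (h : ∀ t ∈ ts, PySem.Str.isIn ("(" ++ t ++ ")") c = false) :
    pvChain (c :: cs) i ts = pvChain cs i ts := by
  induction ts generalizing i with
  | nil => rfl
  | cons t0 ts ih =>
    have h0 : PySem.Str.isIn ("(" ++ t0 ++ ")") c = false := h t0 (by simp)
    simp only [pvChain, pvFindC, h0, Bool.false_eq_true, if_false]
    cases hf : pvFindC t0 cs with
    | some c0 => rfl
    | none => exact ih (i + 1) (fun t ht => h t (List.mem_cons_of_mem _ ht))

theorem pvChain_hit (c : String) (cs : List String) (i : Nat) (ts : List String)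
    (r : Nat) (t : String) (h : pvFirstHit c i ts = some (r, t)) :
    pvChain (c :: cs) i ts =
      match pvChain cs i ts with
      | none => some (r, c, t)
      | some (r', c', t') => if r' < r then some (r', c', t') else some (r, c, t) := by
  induction ts generalizing i with
  | nil => simp [pvFirstHit] at h
  | cons t0 ts ih =>
    simp only [pvFirstHit] at h
    cases h0 : PySem.Str.isIn ("(" ++ t0 ++ ")") c with
    | true =>
      rw [h0] at h; simp only [if_true] at h
      obtain ⟨hr, ht⟩ : i = r ∧ t0 = t := by
        have := h; simp at this; exact ⟨this.1, this.2⟩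
      subst hr; subst ht
      simp only [pvChain, pvFindC, h0, if_true]
      cases hf : pvFindC t0 cs with
      | some c0 => simp
      | none =>
        cases hc : pvChain cs (i + 1) ts with
        | none => simp
        | some p =>
          obtain ⟨r', c', t'⟩ := p
          have hge := pvChain_rank_ge cs (i + 1) ts r' c' t' hc
          simp [if_neg (by omega : ¬ r' < i)]
    | false =>
      rw [h0] at h; simp only [Bool.false_eq_true, if_false] at h
      simp only [pvChain, pvFindC, h0, Bool.false_eq_true, if_false]
      cases hf : pvFindC t0 cs with
      | some c0 =>
        have hr : i + 1 ≤ r := pvFirstHit_rank_ge c (i + 1) ts r t h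
        simp [if_pos (by omega : i < r)]
      | none => exact ih (i + 1) h

theorem pvFold_acc (cs : List String) (s : Nat × String × String) :
    cs.foldl pvStepB (some s) =
      match cs.foldl pvStepB none with
      | none => some s
      | some (r', c', t') => if r' < s.1 then some (r', c', t') else some s := by
  induction cs generalizing s with
  | nil => rfl
  | cons c cs ih =>
    simp only [List.foldl_cons]
    cases hh : pvFirstHit c 0 pvPriorityTypes with
    | none =>
      simp only [pvStepB, hh]
      exact ih s
    | some p =>
      obtain ⟨r, t⟩ := p
      obtain ⟨rs, cS, tS⟩ := s
      simp only [pvStepB, hh]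
      by_cases hlt : r < rs
      · rw [if_pos hlt, ih (r, c, t)]
        cases hc : cs.foldl pvStepB none with
        | none => simp [hlt]
        | some q =>
          obtain ⟨r', c', t'⟩ := q
          by_cases h1 : r' < r
          · simp [h1, show r' < rs by omega]
          · simp [h1, hlt]
      · rw [if_neg hlt, ih (rs, cS, tS), ih (r, c, t)]
        cases hc : cs.foldl pvStepB none with
        | none => simp [hlt]
        | some q =>
          obtain ⟨r', c', t'⟩ := q
          by_cases h2 : r' < rs
          · simp [h2, show r' < r by omega]
          · by_cases h1 : r' < r <;> simp [h1, h2, hlt]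

theorem pvFold_eq_chain (cs : List String) :
    cs.foldl pvStepB none = pvChain cs 0 pvPriorityTypes := by
  induction cs with
  | nil => simp [pvChain_nil]
  | cons c cs ih =>
    simp only [List.foldl_cons]
    cases hh : pvFirstHit c 0 pvPriorityTypes with
    | none =>
      simp only [pvStepB, hh]
      rw [ih, pvChain_skip c cs 0 pvPriorityTypes (pvFirstHit_none c 0 _ hh)]
    | some p =>
      obtain ⟨r, t⟩ := p
      simp only [pvStepB, hh]
      rw [pvChain_hit c cs 0 _ r t hh, ← ih, pvFold_acc]

-- ===== VERDICT (by name: the statement is the Claim_ definition above) =====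
theorem extract_primary_therapeutic_class_spec : Claim_equal_extract_primary_therapeutic_class := by
  intro classes_text _
  unfold Spec_extract_primary_therapeutic_class extract_primary_therapeutic_class
    extract_primary_therapeutic_class_alt
  by_cases h : classes_text = ""
  · simp [h]
  · rw [if_neg h, if_neg h]
    simp only
    rw [pvOuterA_eq_chain _ _ 0, ← pvFold_eq_chain]
    cases ((PySem.Str.split? classes_text "; ").getD []).foldl pvStepB none with
    | none => rfl
    | some p => obtain ⟨r, c, t⟩ := p; rfl
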